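-- pv_equiv track=rewrite | github.com/Kerorogunso/DailyProgrammer | 235ruthaaronpairs.py | ruth_aaron
-- ===== SOURCE A (Python) =====
-- def ruth_aaron(a, b):
--     # Checks if the sum of prime factors are equal
--     def prime_factors(n):
--         # Gets list of all prime factors
--         factors = []
--         for i in range(2, n+1):
--             if n%i == 0 and all([i%y != 0 for y in factors]):
--                 factors.append(i)
--         return factors
--
--     return 'VALID' if sum(prime_factors(a)) == sum(prime_factors(b)) else 'NOT VALID'
-- ===== SOURCE B (Python) =====
-- def ruth_aaron(a, b):
--     # Trial division up to sqrt(n), dividing out each found prime, instead of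
--     # scanning every i in 2..n.
--     def spf_sum(n):
--         s = 0
--         d = 2
--         while d * d <= n:
--             if n % d == 0:
--                 s += d
--                 while n % d == 0:
--                     n //= d
--             d += 1
--         if n > 1:
--             s += n
--         return s
--     return 'VALID' if spf_sum(a) == spf_sum(b) else 'NOT VALID'
-- ===== Notes on version B (the rewrite author's own statement) =====
-- stated objective: faster
-- what changed: Replaces A's scan of every i in 2..n (each with an inner all() over collected factors) by trial division up to sqrt(n) that divides each found prime out of n, summing the distinct prime factors directly.
import Mathlib
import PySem

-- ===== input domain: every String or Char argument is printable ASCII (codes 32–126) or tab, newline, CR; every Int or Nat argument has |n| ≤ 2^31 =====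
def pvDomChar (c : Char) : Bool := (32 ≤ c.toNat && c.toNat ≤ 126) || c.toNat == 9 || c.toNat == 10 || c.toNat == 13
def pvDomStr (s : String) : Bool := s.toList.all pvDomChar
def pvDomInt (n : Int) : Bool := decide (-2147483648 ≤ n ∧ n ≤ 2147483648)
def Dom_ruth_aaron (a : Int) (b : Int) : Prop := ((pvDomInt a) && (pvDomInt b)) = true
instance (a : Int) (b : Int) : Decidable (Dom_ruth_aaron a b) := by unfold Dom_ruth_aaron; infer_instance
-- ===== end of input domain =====

-- B replaces A's scan of every i in 2..n by trial division up to √n that divides each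
-- found prime out of n (objective: faster).

-- ===== PORT A =====
-- prime_factors(n): for i in range(2, n+1): if n%i == 0 and all([i%y != 0 for y in factors]): factors.append(i)
def pvFactorsA (n : Int) : List Int :=
  (PySem.List.pyRange 2 (n + 1) 1).foldl
    (fun factors i =>
      if PySem.Int.mod n i = 0 ∧ ∀ y ∈ factors, PySem.Int.mod i y ≠ 0
      then factors ++ [i] else factors) []

def ruth_aaron (a : Int) (b : Int) : String :=
  if (pvFactorsA a).sum = (pvFactorsA b).sum then "VALID" else "NOT VALID"

-- ===== PORT B =====
-- inner loop `while n % d == 0: n //= d`; fuel only bounds the iteration count to make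
-- the recursion structural — the wrappers below always pass enough fuel for every input
def pvStripF (fuel : Nat) (n d : Int) : Int :=
  match fuel with
  | 0 => n
  | f + 1 =>
    if PySem.Int.mod n d = 0 then pvStripF f (PySem.Int.floordiv n d) d else n

-- outer loop: while d*d <= n: if n%d==0: s += d; strip; d += 1; then if n>1: s += n
def pvSpfLoopF (fuel : Nat) (n d s : Int) : Int :=
  match fuel with
  | 0 => if 1 < n then s + n else s
  | f + 1 =>
    if d * d ≤ n then
      if PySem.Int.mod n d = 0 then pvSpfLoopF f (pvStripF n.toNat n d) (d + 1) (s + d)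
      else pvSpfLoopF f n (d + 1) s
    else if 1 < n then s + n else s

def ruth_aaron_alt (a : Int) (b : Int) : String :=
  if pvSpfLoopF (a.toNat + 1) a 2 0 = pvSpfLoopF (b.toNat + 1) b 2 0
  then "VALID" else "NOT VALID"

-- ===== PRECONDITION & SPEC =====
def Spec_ruth_aaron (a : Int) (b : Int) (out : String) : Prop := out = ruth_aaron_alt a b
instance (a : Int) (b : Int) (out : String) : Decidable (Spec_ruth_aaron a b out) := by unfold Spec_ruth_aaron; infer_instance

-- ===== CLAIM (what is proved, stated in full; the proofs are below) =====
def Claim_equal_ruth_aaron : Prop := ∀ (a : Int) (b : Int), Dom_ruth_aaron a b → Spec_ruth_aaron a b (ruth_aaron a b)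

-- ===== LEMMAS AND PROOFS =====

-- arithmetic helpers
theorem pv_ediv_lt (n d : Int) (hn : 0 < n) (hd : 2 ≤ d) : n / d < n := by
  rcases lt_or_ge (n / d) n with h | h
  · exact h
  · exfalso
    have h1 : n * d ≤ n := (Int.le_ediv_iff_mul_le (by omega : (0:Int) < d)).mp h
    have h2 : n * 2 ≤ n * d := mul_le_mul_of_nonneg_left hd hn.le
    linarith

theorem pv_le_of_sq_le (d n : Int) (h : d * d ≤ n) : d ≤ n := by
  rcases (by omega : d ≤ 0 ∨ d = 1 ∨ 2 ≤ d) with h1 | h1 | h1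
  · have h2 : 0 ≤ d * d := mul_self_nonneg d
    omega
  · subst h1; omega
  · have h2 : 1 * d ≤ d * d := mul_le_mul_of_nonneg_right (by omega) (by omega)
    linarith

-- the common value both sides compute: the sum of the distinct prime factors
def pvS (n : Int) : Int := ∑ p ∈ n.toNat.primeFactors, (p : Int)

theorem pvS_of_le_one (n : Int) (h : n ≤ 1) : pvS n = 0 := by
  have : n.toNat = 0 ∨ n.toNat = 1 := by omega
  rcases this with h' | h' <;> simp [pvS, h']

-- ---- B-side: pvStripF facts (fuel ≥ n.toNat is always enough) ----

theorem pvStripF_pos (fuel : Nat) : ∀ n d : Int, 0 < n → 2 ≤ d → n.toNat ≤ fuel →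
    0 < pvStripF fuel n d := by
  induction fuel with
  | zero => intro n d hn _ hf; omega
  | succ f ih =>
    intro n d hn hd hf
    rw [pvStripF]
    by_cases hmod : PySem.Int.mod n d = 0
    · rw [if_pos hmod, PySem.Int.floordiv_eq_ediv_of_pos (by omega : (0:Int) < d)]
      have hdvd : d ∣ n := (PySem.Int.mod_eq_zero_iff_dvd n d).mp hmod
      have hdn : d ≤ n := Int.le_of_dvd hn hdvd
      have hm : 0 < n / d :=
        lt_of_lt_of_le one_pos ((Int.le_ediv_iff_mul_le (by omega : (0:Int) < d)).mpr (by omega))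
      have hlt : n / d < n := pv_ediv_lt n d hn hd
      exact ih (n / d) d hm hd (by omega)
    · rw [if_neg hmod]; exact hn

theorem pvStripF_le (fuel : Nat) : ∀ n d : Int, 0 < n → 2 ≤ d → n.toNat ≤ fuel →
    pvStripF fuel n d ≤ n := by
  induction fuel with
  | zero => intro n d hn _ hf; omega
  | succ f ih =>
    intro n d hn hd hf
    rw [pvStripF]
    by_cases hmod : PySem.Int.mod n d = 0
    · rw [if_pos hmod, PySem.Int.floordiv_eq_ediv_of_pos (by omega : (0:Int) < d)]
      have hdvd : d ∣ n := (PySem.Int.mod_eq_zero_iff_dvd n d).mp hmod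
      have hdn : d ≤ n := Int.le_of_dvd hn hdvd
      have hm : 0 < n / d :=
        lt_of_lt_of_le one_pos ((Int.le_ediv_iff_mul_le (by omega : (0:Int) < d)).mpr (by omega))
      have hlt : n / d < n := pv_ediv_lt n d hn hd
      have := ih (n / d) d hm hd (by omega)
      omega
    · rw [if_neg hmod]

theorem pvStripF_dvd (fuel : Nat) : ∀ n d : Int, 0 < n → 2 ≤ d → n.toNat ≤ fuel →
    pvStripF fuel n d ∣ n := by
  induction fuel with
  | zero => intro n d hn _ hf; omega
  | succ f ih =>
    intro n d hn hd hf
    rw [pvStripF]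
    by_cases hmod : PySem.Int.mod n d = 0
    · rw [if_pos hmod, PySem.Int.floordiv_eq_ediv_of_pos (by omega : (0:Int) < d)]
      have hdvd : d ∣ n := (PySem.Int.mod_eq_zero_iff_dvd n d).mp hmod
      have hdn : d ≤ n := Int.le_of_dvd hn hdvd
      have hm : 0 < n / d :=
        lt_of_lt_of_le one_pos ((Int.le_ediv_iff_mul_le (by omega : (0:Int) < d)).mpr (by omega))
      have hlt : n / d < n := pv_ediv_lt n d hn hd
      exact dvd_trans (ih (n / d) d hm hd (by omega)) (Int.ediv_dvd_of_dvd hdvd)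
    · rw [if_neg hmod]

theorem pvStripF_not_dvd (fuel : Nat) : ∀ n d : Int, 0 < n → 2 ≤ d → n.toNat ≤ fuel →
    ¬ d ∣ pvStripF fuel n d := by
  induction fuel with
  | zero => intro n d hn _ hf; omega
  | succ f ih =>
    intro n d hn hd hf
    rw [pvStripF]
    by_cases hmod : PySem.Int.mod n d = 0
    · rw [if_pos hmod, PySem.Int.floordiv_eq_ediv_of_pos (by omega : (0:Int) < d)]
      have hdvd : d ∣ n := (PySem.Int.mod_eq_zero_iff_dvd n d).mp hmod
      have hdn : d ≤ n := Int.le_of_dvd hn hdvd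
      have hm : 0 < n / d :=
        lt_of_lt_of_le one_pos ((Int.le_ediv_iff_mul_le (by omega : (0:Int) < d)).mpr (by omega))
      have hlt : n / d < n := pv_ediv_lt n d hn hd
      exact ih (n / d) d hm hd (by omega)
    · rw [if_neg hmod]
      intro hdvd
      exact hmod ((PySem.Int.mod_eq_zero_iff_dvd n d).mpr hdvd)

theorem pvStripF_primeFactors (fuel : Nat) : ∀ n d : Int, 0 < n → 2 ≤ d → n.toNat ≤ fuel →
    d.toNat.Prime → d ∣ n →
    n.toNat.primeFactors = insert d.toNat ((pvStripF fuel n d).toNat.primeFactors) := by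
  induction fuel with
  | zero => intro n d hn _ hf; omega
  | succ f ih =>
    intro n d hn hd hf hp hdvd
    rw [pvStripF, if_pos ((PySem.Int.mod_eq_zero_iff_dvd n d).mpr hdvd),
        PySem.Int.floordiv_eq_ediv_of_pos (by omega : (0:Int) < d)]
    have hmul : d * (n / d) = n := Int.mul_ediv_cancel' hdvd
    have hdn : d ≤ n := Int.le_of_dvd hn hdvd
    have hm : 0 < n / d :=
      lt_of_lt_of_le one_pos ((Int.le_ediv_iff_mul_le (by omega : (0:Int) < d)).mpr (by omega))
    have hlt : n / d < n := pv_ediv_lt n d hn hd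
    have hNat : n.toNat = d.toNat * (n / d).toNat := by
      have hcast : ((d.toNat * (n / d).toNat : ℕ) : ℤ) = (n.toNat : ℤ) := by
        push_cast
        rw [Int.toNat_of_nonneg (by omega : (0:Int) ≤ d),
            Int.toNat_of_nonneg hm.le, Int.toNat_of_nonneg hn.le, hmul]
      exact_mod_cast hcast.symm
    rw [hNat, Nat.primeFactors_mul (by omega) (by omega), hp.primeFactors]
    by_cases hdd : d ∣ n / d
    · rw [ih (n / d) d hm hd (by omega) hp hdd, Finset.singleton_union, Finset.insert_idem]
    · have hstop : pvStripF f (n / d) d = n / d := by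
        cases f with
        | zero => rfl
        | succ f' =>
          rw [pvStripF, if_neg]
          intro hmod
          exact hdd ((PySem.Int.mod_eq_zero_iff_dvd _ d).mp hmod)
      rw [hstop, Finset.singleton_union]

-- ---- B-side: the outer loop computes s + pvS n ----

theorem pvSpfLoopF_eq (fuel : Nat) : ∀ n d s : Int, (n + 1 - d).toNat ≤ fuel → 1 ≤ n → 2 ≤ d →
    (∀ p : ℕ, p.Prime → (p : ℤ) ∣ n → d ≤ (p : ℤ)) → pvSpfLoopF fuel n d s = s + pvS n := by
  induction fuel with
  | zero =>
    intro n d s hk hn hd hmin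
    rw [pvSpfLoopF]
    have hg : ¬ d * d ≤ n := by
      intro hg
      have := pv_le_of_sq_le d n hg
      omega
    by_cases h1 : 1 < n
    · rw [if_pos h1]
      have hprime : n.toNat.Prime := by
        by_contra hnp
        have h3 := Nat.minFac_sq_le_self (by omega : 0 < n.toNat) hnp
        have h4 : n.toNat.minFac.Prime := Nat.minFac_prime (by omega)
        have h5 : (n.toNat.minFac : ℤ) ∣ n := by
          have := Int.natCast_dvd_natCast.mpr (Nat.minFac_dvd n.toNat)
          rwa [Int.toNat_of_nonneg (by omega : (0:Int) ≤ n)] at this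
        have h6 := hmin _ h4 h5
        have h7 : d * d ≤ (n.toNat.minFac : ℤ) * (n.toNat.minFac : ℤ) :=
          mul_le_mul h6 h6 (by omega) (by positivity)
        have h8 : ((n.toNat.minFac : ℤ)) * (n.toNat.minFac : ℤ) ≤ n := by
          have : ((n.toNat.minFac ^ 2 : ℕ) : ℤ) ≤ ((n.toNat : ℕ) : ℤ) := by exact_mod_cast h3
          push_cast at this
          rw [Int.toNat_of_nonneg (by omega : (0:Int) ≤ n)] at this
          nlinarith [this]
        omega
      unfold pvS
      rw [hprime.primeFactors, Finset.sum_singleton]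
      omega
    · rw [if_neg h1, pvS_of_le_one n (by omega)]
      ring
  | succ f ih =>
    intro n d s hk hn hd hmin
    rw [pvSpfLoopF]
    by_cases hg : d * d ≤ n
    · have hdn : d ≤ n := pv_le_of_sq_le d n hg
      by_cases hmod : PySem.Int.mod n d = 0
      · rw [if_pos hg, if_pos hmod]
        have hdvd : d ∣ n := (PySem.Int.mod_eq_zero_iff_dvd n d).mp hmod
        have hdp : d.toNat.Prime := by
          have h4 : d.toNat.minFac.Prime := Nat.minFac_prime (by omega)
          have h5 : (d.toNat.minFac : ℤ) ∣ n := by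
            refine dvd_trans ?_ hdvd
            have := Int.natCast_dvd_natCast.mpr (Nat.minFac_dvd d.toNat)
            rwa [Int.toNat_of_nonneg (by omega : (0:Int) ≤ d)] at this
          have h6 := hmin _ h4 h5
          have h7 : d.toNat.minFac ≤ d.toNat := Nat.minFac_le (by omega)
          have h8 : d.toNat.minFac = d.toNat := by omega
          rwa [h8] at h4
        have hn'pos := pvStripF_pos n.toNat n d (by omega) hd le_rfl
        have hn'dvd := pvStripF_dvd n.toNat n d (by omega) hd le_rfl
        have hn'nd := pvStripF_not_dvd n.toNat n d (by omega) hd le_rfl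
        have hpf := pvStripF_primeFactors n.toNat n d (by omega) hd le_rfl hdp hdvd
        have hd_not_mem : d.toNat ∉ (pvStripF n.toNat n d).toNat.primeFactors := by
          intro hmem
          apply hn'nd
          have := Int.natCast_dvd_natCast.mpr (Nat.dvd_of_mem_primeFactors hmem)
          rwa [Int.toNat_of_nonneg (by omega : (0:Int) ≤ d),
               Int.toNat_of_nonneg hn'pos.le] at this
        have hS : pvS n = d + pvS (pvStripF n.toNat n d) := by
          unfold pvS
          rw [hpf, Finset.sum_insert hd_not_mem, Int.toNat_of_nonneg (by omega : (0:Int) ≤ d)]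
        have hmin' : ∀ p : ℕ, p.Prime → (p : ℤ) ∣ pvStripF n.toNat n d → d + 1 ≤ (p : ℤ) := by
          intro p hp hpd
          have h2 := hmin p hp (hpd.trans hn'dvd)
          have h3 : (p : ℤ) ≠ d := by
            intro he; exact hn'nd (he ▸ hpd)
          omega
        have hle := pvStripF_le n.toNat n d (by omega) hd le_rfl
        rw [ih (pvStripF n.toNat n d) (d + 1) (s + d) (by omega) (by omega) (by omega) hmin']
        rw [hS]; ring
      · rw [if_pos hg, if_neg hmod]
        have hnd : ¬ d ∣ n := fun h => hmod ((PySem.Int.mod_eq_zero_iff_dvd n d).mpr h)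
        have hmin' : ∀ p : ℕ, p.Prime → (p : ℤ) ∣ n → d + 1 ≤ (p : ℤ) := by
          intro p hp hpd
          have h2 := hmin p hp hpd
          have h3 : (p : ℤ) ≠ d := by
            intro he; exact hnd (he ▸ hpd)
          omega
        exact ih n (d + 1) s (by omega) hn (by omega) hmin'
    · rw [if_neg hg]
      by_cases h1 : 1 < n
      · rw [if_pos h1]
        have hprime : n.toNat.Prime := by
          by_contra hnp
          have h3 := Nat.minFac_sq_le_self (by omega : 0 < n.toNat) hnp
          have h4 : n.toNat.minFac.Prime := Nat.minFac_prime (by omega)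
          have h5 : (n.toNat.minFac : ℤ) ∣ n := by
            have := Int.natCast_dvd_natCast.mpr (Nat.minFac_dvd n.toNat)
            rwa [Int.toNat_of_nonneg (by omega : (0:Int) ≤ n)] at this
          have h6 := hmin _ h4 h5
          have h7 : d * d ≤ (n.toNat.minFac : ℤ) * (n.toNat.minFac : ℤ) :=
            mul_le_mul h6 h6 (by omega) (by positivity)
          have h8 : ((n.toNat.minFac : ℤ)) * (n.toNat.minFac : ℤ) ≤ n := by
            have : ((n.toNat.minFac ^ 2 : ℕ) : ℤ) ≤ ((n.toNat : ℕ) : ℤ) := by exact_mod_cast h3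
            push_cast at this
            rw [Int.toNat_of_nonneg (by omega : (0:Int) ≤ n)] at this
            nlinarith [this]
          omega
        unfold pvS
        rw [hprime.primeFactors, Finset.sum_singleton]
        omega
      · rw [if_neg h1, pvS_of_le_one n (by omega)]
        ring

theorem pvSpf_main (n : Int) : pvSpfLoopF (n.toNat + 1) n 2 0 = pvS n := by
  by_cases hn : 2 ≤ n
  · have := pvSpfLoopF_eq (n.toNat + 1) n 2 0 (by omega) (by omega) (by omega)
      (fun p hp _ => by exact_mod_cast hp.two_le)
    omega
  · rw [pvSpfLoopF, if_neg (by omega : ¬ (2:Int) * 2 ≤ n), if_neg (by omega : ¬ (1:Int) < n),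
        pvS_of_le_one n (by omega)]

-- ---- A-side: the accumulated factors list is the filtered range ----

theorem pvCondA_iff (n x : Int) (F : List Int) (hx : 2 ≤ x)
    (hF : ∀ y, y ∈ F ↔ (2 ≤ y ∧ y < x ∧ y ∣ n ∧ y.toNat.Prime)) :
    (PySem.Int.mod n x = 0 ∧ ∀ y ∈ F, PySem.Int.mod x y ≠ 0) ↔ (x ∣ n ∧ x.toNat.Prime) := by
  constructor
  · rintro ⟨h1, h2⟩
    have hdvd : x ∣ n := (PySem.Int.mod_eq_zero_iff_dvd n x).mp h1
    refine ⟨hdvd, ?_⟩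
    by_contra hnp
    have hq : x.toNat.minFac.Prime := Nat.minFac_prime (by omega)
    have hqle : x.toNat.minFac ≤ x.toNat := Nat.minFac_le (by omega)
    have hqne : x.toNat.minFac ≠ x.toNat := by
      intro he; exact hnp (he ▸ hq)
    have hqdx : ((x.toNat.minFac : ℤ)) ∣ x := by
      have := Int.natCast_dvd_natCast.mpr (Nat.minFac_dvd x.toNat)
      rwa [Int.toNat_of_nonneg (by omega : (0:Int) ≤ x)] at this
    have hyF : ((x.toNat.minFac : ℤ)) ∈ F := by
      rw [hF]
      refine ⟨by exact_mod_cast hq.two_le, by omega, hqdx.trans hdvd, ?_⟩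
      rwa [Int.toNat_natCast]
    exact h2 _ hyF ((PySem.Int.mod_eq_zero_iff_dvd x _).mpr hqdx)
  · rintro ⟨hdvd, hp⟩
    refine ⟨(PySem.Int.mod_eq_zero_iff_dvd n x).mpr hdvd, ?_⟩
    intro y hy hmod0
    obtain ⟨hy2, hyx, _, _⟩ := (hF y).mp hy
    have hyxd : y ∣ x := (PySem.Int.mod_eq_zero_iff_dvd x y).mp hmod0
    have hNat : y.toNat ∣ x.toNat := by
      have : ((y.toNat : ℤ)) ∣ ((x.toNat : ℤ)) := by
        rwa [Int.toNat_of_nonneg (by omega : (0:Int) ≤ y),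
             Int.toNat_of_nonneg (by omega : (0:Int) ≤ x)]
      exact_mod_cast this
    rcases hp.eq_one_or_self_of_dvd _ hNat with h | h <;> omega

theorem pvFoldA (n : Int) (k : ℕ) :
    (PySem.List.pyRange 2 (2 + (k : ℤ)) 1).foldl
      (fun factors i =>
        if PySem.Int.mod n i = 0 ∧ ∀ y ∈ factors, PySem.Int.mod i y ≠ 0
        then factors ++ [i] else factors) [] =
    (PySem.List.pyRange 2 (2 + (k : ℤ)) 1).filter
      (fun i => decide (i ∣ n ∧ i.toNat.Prime)) := by
  induction k with
  | zero => rw [show ((2:ℤ) + (0:ℕ)) = 2 by norm_num, PySem.List.pyRange_one_eq_nil le_rfl]; rfl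
  | succ k ihk =>
    have hsplit : PySem.List.pyRange 2 (2 + ((k + 1 : ℕ) : ℤ)) 1 =
        PySem.List.pyRange 2 (2 + (k : ℤ)) 1 ++ [2 + (k : ℤ)] := by
      rw [show ((2:ℤ) + ((k + 1 : ℕ) : ℤ)) = (2 + (k : ℤ)) + 1 by push_cast; ring]
      exact PySem.List.pyRange_one_succ_right (by omega)
    rw [hsplit, List.foldl_append, List.filter_append, ihk]
    have hF : ∀ y, y ∈ (PySem.List.pyRange 2 (2 + (k : ℤ)) 1).filter
        (fun i => decide (i ∣ n ∧ i.toNat.Prime)) ↔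
        (2 ≤ y ∧ y < 2 + (k : ℤ) ∧ y ∣ n ∧ y.toNat.Prime) := by
      intro y
      simp only [List.mem_filter, PySem.List.mem_pyRange_one, decide_eq_true_eq]
      tauto
    have hcond := pvCondA_iff n (2 + (k : ℤ)) _ (by omega) hF
    simp only [List.foldl_cons, List.foldl_nil, List.filter_cons, List.filter_nil,
      decide_eq_true_eq]
    by_cases hc : (2 + (k : ℤ)) ∣ n ∧ (2 + (k : ℤ)).toNat.Prime
    · rw [if_pos (hcond.mpr hc), if_pos hc]
    · rw [if_neg (fun h => hc (hcond.mp h)), if_neg hc, List.append_nil]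

theorem pvFactorsA_sum (n : Int) : (pvFactorsA n).sum = pvS n := by
  by_cases hn : 2 ≤ n
  · have hk : ((n - 1).toNat : ℤ) = n - 1 := by omega
    have h1 : pvFactorsA n = (PySem.List.pyRange 2 (n + 1) 1).filter
        (fun i => decide (i ∣ n ∧ i.toNat.Prime)) := by
      unfold pvFactorsA
      have := pvFoldA n (n - 1).toNat
      rw [hk] at this
      rw [show n + 1 = 2 + (n - 1) by ring]
      exact this
    rw [h1]
    set F := (PySem.List.pyRange 2 (n + 1) 1).filter
        (fun i => decide (i ∣ n ∧ i.toNat.Prime)) with hFdef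
    have hnd : F.Nodup := (PySem.List.nodup_pyRange_one 2 (n + 1)).filter _
    have hsum := List.sum_toFinset id hnd
    rw [List.map_id] at hsum
    have hset : F.toFinset = n.toNat.primeFactors.map ⟨Nat.cast, Nat.cast_injective⟩ := by
      ext i
      simp only [List.mem_toFinset, hFdef, List.mem_filter, PySem.List.mem_pyRange_one,
        decide_eq_true_eq, Finset.mem_map, Nat.mem_primeFactors, Function.Embedding.coeFn_mk]
      constructor
      · rintro ⟨⟨hi2, hin⟩, hid, hip⟩
        refine ⟨i.toNat, ⟨hip, ?_, by omega⟩, by omega⟩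
        have : ((i.toNat : ℤ)) ∣ ((n.toNat : ℤ)) := by
          rwa [Int.toNat_of_nonneg (by omega : (0:Int) ≤ i),
               Int.toNat_of_nonneg (by omega : (0:Int) ≤ n)]
        exact_mod_cast this
      · rintro ⟨p, ⟨hp, hpd, _⟩, rfl⟩
        have hpd' : ((p : ℤ)) ∣ n := by
          have := Int.natCast_dvd_natCast.mpr hpd
          rwa [Int.toNat_of_nonneg (by omega : (0:Int) ≤ n)] at this
        have hple : p ≤ n.toNat := Nat.le_of_dvd (by omega) hpd
        refine ⟨⟨by exact_mod_cast hp.two_le, by omega⟩, hpd', ?_⟩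
        rwa [Int.toNat_natCast]
    rw [← hsum, hset, Finset.sum_map]
    rfl
  · unfold pvFactorsA
    rw [PySem.List.pyRange_one_eq_nil (by omega : n + 1 ≤ 2), List.foldl_nil,
        List.sum_nil, pvS_of_le_one n (by omega)]

-- ===== VERDICT (by name: the statement is the Claim_ definition above) =====
theorem ruth_aaron_spec : Claim_equal_ruth_aaron := by
  intro a b _
  unfold Spec_ruth_aaron ruth_aaron ruth_aaron_alt
  rw [pvFactorsA_sum a, pvFactorsA_sum b, pvSpf_main a, pvSpf_main b]
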